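-- pv_equiv track=rewrite | github.com/FraiVadim/Functii | F_P_3numere.py | totidiv
-- ===== SOURCE A (Python) =====
-- def totidiv(a,b,c):
--     while(a != b):
--         if(a > b):
--             a=a-b
--         else:
--             b=b-a
--     while(a != c):
--         if(a > c):
--             a=a-c
--         else:
--             c=c-a
--     d=1
--     list=[]
--     while d<=a:
--         if a%d==0:
--             list.append(d)
--             d=d+1
--         else:
--             d=d+1
--
--     return (list)
-- ===== SOURCE B (Python) =====
-- def totidiv(a, b, c):
--     # Euclidean gcd (modulo) instead of subtraction gcd, then divisor
--     # enumeration up to sqrt(g) with sorting instead of a scan to g.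
--     def gcd(x, y):
--         while y:
--             x, y = y, x % y
--         return x
--     g = gcd(gcd(a, b), c)
--     divs = []
--     i = 1
--     while i * i <= g:
--         if g % i == 0:
--             divs.append(i)
--             if i != g // i:
--                 divs.append(g // i)
--         i += 1
--     return sorted(divs)
-- ===== Notes on version B (the rewrite author's own statement) =====
-- stated objective: faster
-- what changed: B replaces A's subtraction-based GCD loops by Euclidean modulo GCD and replaces A's divisor scan over every d in 1..g by enumerating divisor pairs up to sqrt(g) followed by a sort.
import Mathlib
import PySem

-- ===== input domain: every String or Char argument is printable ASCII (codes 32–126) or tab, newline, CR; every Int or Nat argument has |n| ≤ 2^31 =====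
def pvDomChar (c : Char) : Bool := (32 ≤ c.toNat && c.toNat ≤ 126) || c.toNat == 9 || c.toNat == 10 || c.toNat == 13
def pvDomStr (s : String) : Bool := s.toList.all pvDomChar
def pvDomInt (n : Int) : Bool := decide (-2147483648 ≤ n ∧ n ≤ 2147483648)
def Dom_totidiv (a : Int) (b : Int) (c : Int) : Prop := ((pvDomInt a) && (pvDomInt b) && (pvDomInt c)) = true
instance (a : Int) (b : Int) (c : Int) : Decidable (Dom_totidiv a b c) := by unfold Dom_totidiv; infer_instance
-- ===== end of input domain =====

-- B replaces A's subtraction GCD by Euclidean modulo GCD and A's 1..g divisor scan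
-- by sqrt-bounded divisor-pair enumeration plus a sort (objective: faster).

-- ===== PORT A =====
-- A's 'while a != b: subtract' loop (used twice in A), step for step.  The Nat
-- fuel only makes the function total: it is always sufficient on the inputs
-- admitted by Pre_; on nonpositive unequal arguments Python diverges (outside
-- Pre_), and there nothing is claimed.
def pvSubGcdGo : Nat → Int → Int → Int
  | 0, a, _ => a
  | n + 1, a, b =>
    if a = b then a
    else if a > b then pvSubGcdGo n (a - b) b
    else pvSubGcdGo n a (b - a)

def pvSubGcd (a : Int) (b : Int) : Int := pvSubGcdGo ((a + b).toNat + 1) a b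

-- A's 'd=1 … while d<=a' divisor-collecting loop, step for step (fuel = number
-- of remaining loop iterations, always sufficient).
def pvDivLoopGo : Nat → Int → Int → List Int → List Int
  | 0, _, _, acc => acc
  | n + 1, a, d, acc =>
    if d ≤ a then
      if PySem.Int.mod a d = 0 then pvDivLoopGo n a (d + 1) (acc ++ [d])
      else pvDivLoopGo n a (d + 1) acc
    else acc

def pvDivLoop (a : Int) (d : Int) (acc : List Int) : List Int :=
  pvDivLoopGo (a + 1 - d).toNat a d acc

def totidiv (a : Int) (b : Int) (c : Int) : List Int :=
  let a1 := pvSubGcd a b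
  let a2 := pvSubGcd a1 c
  pvDivLoop a2 1 []

-- ===== PORT B =====
-- B's 'while y: x, y = y, x % y' (fuel |y|+1 is always sufficient)
def pvEuclidGo : Nat → Int → Int → Int
  | 0, x, _ => x
  | n + 1, x, y => if y = 0 then x else pvEuclidGo n y (PySem.Int.mod x y)

def pvEuclid (x : Int) (y : Int) : Int := pvEuclidGo (y.natAbs + 1) x y

-- B's 'i=1 … while i*i <= g' divisor-pair loop
def pvSqrtLoopGo : Nat → Int → Int → List Int → List Int
  | 0, _, _, acc => acc
  | n + 1, g, i, acc =>
    if i * i ≤ g then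
      if PySem.Int.mod g i = 0 then
        pvSqrtLoopGo n g (i + 1)
          (acc ++ [i] ++
            (if i ≠ PySem.Int.floordiv g i then [PySem.Int.floordiv g i] else []))
      else pvSqrtLoopGo n g (i + 1) acc
    else acc

def pvSqrtLoop (g : Int) (i : Int) (acc : List Int) : List Int :=
  pvSqrtLoopGo (g + 1 - i).toNat g i acc

def totidiv_alt (a : Int) (b : Int) (c : Int) : List Int :=
  let g := pvEuclid (pvEuclid a b) c
  PySem.List.sorted (pvSqrtLoop g 1 []) (fun x => x) false

-- ===== PRECONDITION & SPEC =====
-- Pre_ excludes exactly the inputs on which Python A never returns: A's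
-- subtraction loops diverge whenever the arguments are not all positive,
-- except in the degenerate case a = b = c ≤ 0 where both loops are skipped
-- and A returns [].
def Pre_totidiv (a : Int) (b : Int) (c : Int) : Prop :=
  (0 < a ∧ 0 < b ∧ 0 < c) ∨ (a = b ∧ b = c ∧ a ≤ 0)
instance (a : Int) (b : Int) (c : Int) : Decidable (Pre_totidiv a b c) := by
  unfold Pre_totidiv; infer_instance

def pvWitness_totidiv : Int × Int × Int := (4, 6, 8)

def Spec_totidiv (a : Int) (b : Int) (c : Int) (out : List Int) : Prop := out = totidiv_alt a b c
instance (a : Int) (b : Int) (c : Int) (out : List Int) : Decidable (Spec_totidiv a b c out) := by unfold Spec_totidiv; infer_instance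

-- ===== CLAIM (what is proved, stated in full; the proofs are below) =====
def Claim_equal_totidiv : Prop := ∀ (a : Int) (b : Int) (c : Int), Dom_totidiv a b c → Pre_totidiv a b c → Spec_totidiv a b c (totidiv a b c)

-- ===== LEMMAS AND PROOFS =====

-- arithmetic helpers
theorem pvPosFactor (i q : Int) (hi : 1 ≤ i) (h : 0 < i * q) : 1 ≤ q := by
  by_contra h'
  have : i * q ≤ 0 := mul_nonpos_of_nonneg_of_nonpos (by omega) (by omega)
  omega

theorem pvLeMulSelf (i q : Int) (hi : 1 ≤ i) (hq : 0 ≤ q) : q ≤ i * q := by nlinarith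

theorem pvSelfLeMul (i x : Int) (hx : 1 ≤ x) (hi : 0 ≤ i) : i ≤ i * x := by nlinarith

-- if x divides g and i*x ≤ g < (i+1)*x then g = i*x exactly
theorem pvExactQuot (g i x : Int) (hi : 1 ≤ i) (hx1 : 1 ≤ x) (hdvd : x ∣ g)
    (h4 : i * x ≤ g) (hc : g < (i + 1) * x) : g = i * x := by
  obtain ⟨m, hm⟩ := hdvd
  have h5 : x * i ≤ x * m := by
    calc x * i = i * x := mul_comm x i
      _ ≤ g := h4
      _ = x * m := hm
  have h6 : x * m < x * (i + 1) := by
    calc x * m = g := hm.symm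
      _ < (i + 1) * x := hc
      _ = x * (i + 1) := mul_comm _ _
  have him : i ≤ m := le_of_mul_le_mul_left h5 (by omega)
  have him2 : m < i + 1 := lt_of_mul_lt_mul_left h6 (by omega)
  have hmi : m = i := by omega
  rw [hm, hmi, mul_comm]

-- A's subtraction loop computes the gcd on positive inputs (any sufficient fuel).
theorem pvSubGcdGo_eq_gcd (n : Nat) : ∀ a b : Int, 0 < a → 0 < b →
    (a + b).toNat ≤ n → pvSubGcdGo n a b = (Int.gcd a b : Int) := by
  induction n with
  | zero => intro a b ha hb hf; omega
  | succ n ih =>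
    intro a b ha hb hf
    by_cases hab : a = b
    · subst hab
      simp only [pvSubGcdGo, if_pos rfl]
      simp [Int.gcd_self, Int.natAbs_of_nonneg ha.le]
    · by_cases hgt : a > b
      · rw [show pvSubGcdGo (n + 1) a b = pvSubGcdGo n (a - b) b by
          simp only [pvSubGcdGo, if_neg hab, if_pos hgt]]
        rw [ih (a - b) b (by omega) hb (by omega), Int.gcd_sub_self_left]
      · rw [show pvSubGcdGo (n + 1) a b = pvSubGcdGo n a (b - a) by
          simp only [pvSubGcdGo, if_neg hab, if_neg hgt]]
        rw [ih a (b - a) ha (by omega) (by omega), Int.gcd_sub_self_right]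

theorem pvSubGcd_eq_gcd (a b : Int) (ha : 0 < a) (hb : 0 < b) :
    pvSubGcd a b = (Int.gcd a b : Int) :=
  pvSubGcdGo_eq_gcd ((a + b).toNat + 1) a b ha hb (by omega)

-- B's Euclidean loop computes the gcd for 0 < x, 0 ≤ y (any sufficient fuel).
theorem pvEuclidGo_eq_gcd (n : Nat) : ∀ x y : Int, 0 < x → 0 ≤ y →
    y.natAbs < n → pvEuclidGo n x y = (Int.gcd x y : Int) := by
  induction n with
  | zero => intro x y hx hy hf; omega
  | succ n ih =>
    intro x y hx hy hf
    by_cases hy0 : y = 0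
    · subst hy0
      simp only [pvEuclidGo, if_pos rfl]
      simp [Int.natAbs_of_nonneg hx.le]
    · have hypos : 0 < y := by omega
      have hm : PySem.Int.mod x y = x % y := PySem.Int.mod_eq_emod_of_pos hypos
      rw [show pvEuclidGo (n + 1) x y = pvEuclidGo n y (PySem.Int.mod x y) by
        simp only [pvEuclidGo, if_neg hy0]]
      rw [hm]
      have he1 : 0 ≤ x % y := Int.emod_nonneg x (by omega)
      have he2 : x % y < y := Int.emod_lt_of_pos x hypos
      rw [ih y (x % y) hypos he1 (by omega)]
      rw [Int.gcd_comm y (x % y), Int.gcd_emod]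

theorem pvEuclid_eq_gcd (x y : Int) (hx : 0 < x) (hy : 0 ≤ y) :
    pvEuclid x y = (Int.gcd x y : Int) :=
  pvEuclidGo_eq_gcd (y.natAbs + 1) x y hx hy (by omega)

-- A's divisor loop is the filtered range (any sufficient fuel).
theorem pvDivLoopGo_eq (n : Nat) : ∀ (a d : Int) (acc : List Int),
    (a + 1 - d).toNat ≤ n →
    pvDivLoopGo n a d acc =
      acc ++ (PySem.List.pyRange d (a + 1) 1).filter
        (fun x => decide (PySem.Int.mod a x = 0)) := by
  induction n with
  | zero =>
    intro a d acc hf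
    rw [show pvDivLoopGo 0 a d acc = acc from rfl,
        PySem.List.pyRange_one_eq_nil (by omega : a + 1 ≤ d)]
    simp
  | succ n ih =>
    intro a d acc hf
    by_cases hd : d ≤ a
    · by_cases hm : PySem.Int.mod a d = 0
      · rw [show pvDivLoopGo (n + 1) a d acc = pvDivLoopGo n a (d + 1) (acc ++ [d]) by
          simp only [pvDivLoopGo, if_pos hd, if_pos hm]]
        rw [ih a (d + 1) (acc ++ [d]) (by omega),
            PySem.List.pyRange_one_cons (by omega : d < a + 1)]
        simp [hm]
      · rw [show pvDivLoopGo (n + 1) a d acc = pvDivLoopGo n a (d + 1) acc by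
          simp only [pvDivLoopGo, if_neg hm, if_pos hd]]
        rw [ih a (d + 1) acc (by omega),
            PySem.List.pyRange_one_cons (by omega : d < a + 1)]
        simp [hm]
    · rw [show pvDivLoopGo (n + 1) a d acc = acc by
          simp only [pvDivLoopGo, if_neg hd]]
      rw [PySem.List.pyRange_one_eq_nil (by omega : a + 1 ≤ d)]
      simp

-- the exact quotient of an exact division
theorem pvQuot_spec (g i : Int) (hi : 0 < i) (hdvd : i ∣ g) :
    i * PySem.Int.floordiv g i = g := by
  rw [PySem.Int.floordiv_eq_ediv_of_pos hi]
  exact Int.mul_ediv_cancel' hdvd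

-- membership in B's sqrt loop result (any sufficient fuel)
theorem pvSqrtLoopGo_mem (g : Int) (n : Nat) : ∀ (i : Int) (acc : List Int),
    0 < g → 1 ≤ i → (g + 1 - i).toNat ≤ n → ∀ x : Int,
    (x ∈ pvSqrtLoopGo n g i acc ↔
      x ∈ acc ∨ (x ∣ g ∧ 1 ≤ x ∧ x ≤ g ∧
        ((i ≤ x ∧ x * x ≤ g) ∨ (g ≤ x * x ∧ i * x ≤ g)))) := by
  induction n with
  | zero =>
    intro i acc hg hi hf x
    rw [show pvSqrtLoopGo 0 g i acc = acc from rfl]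
    constructor
    · exact Or.inl
    · rintro (hmem | ⟨hdvd, hx1, hxg, hcase⟩)
      · exact hmem
      · exfalso
        rcases hcase with ⟨h3, h4⟩ | ⟨h3, h4⟩
        · omega
        · have := pvSelfLeMul i x hx1 (by omega)
          omega
  | succ n ih =>
    intro i acc hg hi hf x
    by_cases h1 : i * i ≤ g
    · have hig : i ≤ g := le_trans (pvSelfLeMul i i hi (by omega)) h1
      have hring : ∀ z : Int, (i + 1) * z = i * z + z := by intro z; ring
      by_cases h2 : PySem.Int.mod g i = 0
      · have hidvd : i ∣ g := (PySem.Int.mod_eq_zero_iff_dvd g i).mp h2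
        have hgq : i * PySem.Int.floordiv g i = g := pvQuot_spec g i (by omega) hidvd
        set q := PySem.Int.floordiv g i with hq
        have hq1 : 1 ≤ q := pvPosFactor i q hi (by omega)
        have hiq : i ≤ q := le_of_mul_le_mul_left (by calc i * i ≤ g := h1
                                                        _ = i * q := hgq.symm) (by omega)
        have hqg : q ≤ g := by have := pvLeMulSelf i q hi (by omega); omega
        rw [show pvSqrtLoopGo (n + 1) g i acc =
            pvSqrtLoopGo n g (i + 1) (acc ++ [i] ++ (if i ≠ q then [q] else [])) by
          simp only [pvSqrtLoopGo, if_pos h1, if_pos h2, hq]]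
        rw [ih (i + 1) _ hg (by omega) (by omega) x]
        have hsplit : x ∈ acc ++ [i] ++ (if i ≠ q then [q] else []) ↔
            x ∈ acc ∨ x = i ∨ (i ≠ q ∧ x = q) := by
          by_cases hne : i ≠ q
          · simp [hne, or_assoc]
          · simp [hne]
        rw [hsplit]
        constructor
        · rintro ((hmem | hxi | ⟨hne, hxq⟩) | ⟨hdvd, hx1, hxg, hcase⟩)
          · exact Or.inl hmem
          · subst hxi
            exact Or.inr ⟨hidvd, by omega, hig, Or.inl ⟨le_rfl, h1⟩⟩
          · subst hxq
            refine Or.inr ⟨⟨i, by rw [mul_comm]; omega⟩, hq1, hqg, ?_⟩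
            rcases le_or_gt (q * q) g with hc | hc
            · exact Or.inl ⟨hiq, hc⟩
            · exact Or.inr ⟨hc.le, by omega⟩
          · refine Or.inr ⟨hdvd, hx1, hxg, ?_⟩
            rcases hcase with ⟨h3, h4⟩ | ⟨h3, h4⟩
            · exact Or.inl ⟨by omega, h4⟩
            · exact Or.inr ⟨h3, by have := hring x; omega⟩
        · rintro (hmem | ⟨hdvd, hx1, hxg, hcase⟩)
          · exact Or.inl (Or.inl hmem)
          · by_cases hxi : x = i
            · exact Or.inl (Or.inr (Or.inl hxi))
            by_cases hxq : x = q
            · subst hxq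
              exact Or.inl (Or.inr (Or.inr ⟨fun he => hxi he.symm, rfl⟩))
            refine Or.inr ⟨hdvd, hx1, hxg, ?_⟩
            rcases hcase with ⟨h3, h4⟩ | ⟨h3, h4⟩
            · exact Or.inl ⟨by omega, h4⟩
            · rcases le_or_gt ((i + 1) * x) g with hc | hc
              · exact Or.inr ⟨h3, hc⟩
              · exfalso
                have hgex : g = i * x := pvExactQuot g i x hi hx1 hdvd h4 hc
                have : i * x = i * q := by omega
                exact hxq (mul_left_cancel₀ (by omega : i ≠ 0) this)
      · have hndvd : ¬ i ∣ g := fun hd => h2 ((PySem.Int.mod_eq_zero_iff_dvd g i).mpr hd)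
        rw [show pvSqrtLoopGo (n + 1) g i acc = pvSqrtLoopGo n g (i + 1) acc by
          simp only [pvSqrtLoopGo, if_pos h1, if_neg h2]]
        rw [ih (i + 1) acc hg (by omega) (by omega) x]
        constructor
        · rintro (hmem | ⟨hdvd, hx1, hxg, hcase⟩)
          · exact Or.inl hmem
          · refine Or.inr ⟨hdvd, hx1, hxg, ?_⟩
            rcases hcase with ⟨h3, h4⟩ | ⟨h3, h4⟩
            · exact Or.inl ⟨by omega, h4⟩
            · exact Or.inr ⟨h3, by have := hring x; omega⟩
        · rintro (hmem | ⟨hdvd, hx1, hxg, hcase⟩)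
          · exact Or.inl hmem
          · refine Or.inr ⟨hdvd, hx1, hxg, ?_⟩
            rcases hcase with ⟨h3, h4⟩ | ⟨h3, h4⟩
            · have hxi : x ≠ i := fun he => hndvd (he ▸ hdvd)
              exact Or.inl ⟨by omega, h4⟩
            · rcases le_or_gt ((i + 1) * x) g with hc | hc
              · exact Or.inr ⟨h3, hc⟩
              · exfalso
                have hgex : g = i * x := pvExactQuot g i x hi hx1 hdvd h4 hc
                exact hndvd ⟨x, hgex⟩
    · rw [show pvSqrtLoopGo (n + 1) g i acc = acc by
        simp only [pvSqrtLoopGo, if_neg h1]]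
      constructor
      · exact Or.inl
      · rintro (hmem | ⟨hdvd, hx1, hxg, hcase⟩)
        · exact hmem
        · exfalso
          rcases hcase with ⟨h3, h4⟩ | ⟨h3, h4⟩
          · have e1 : i * i ≤ i * x := mul_le_mul_of_nonneg_left h3 (by omega)
            have e2 : i * x ≤ x * x := mul_le_mul_of_nonneg_right h3 (by omega)
            omega
          · have hxl : x < i := lt_of_mul_lt_mul_left
              (by calc i * x ≤ g := h4
                   _ < i * i := by omega) (by omega : (0:Int) ≤ i)
            have hix : i ≤ x := le_of_mul_le_mul_left
              (by calc x * i = i * x := mul_comm x i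
                   _ ≤ g := h4
                   _ ≤ x * x := h3) (by omega : (0:Int) < x)
            omega
  -- note: in the first exfalso branch e1/e2 relate i*i, i*x, x*x; omega closes with h1, h4

-- B's sqrt loop result has no duplicates (any sufficient fuel).
theorem pvSqrtLoopGo_nodup (g : Int) (n : Nat) : ∀ (i : Int) (acc : List Int),
    0 < g → 1 ≤ i → acc.Nodup →
    (∀ x ∈ acc, x ∣ g ∧ 1 ≤ x ∧ (x < i ∨ g < i * x)) →
    (pvSqrtLoopGo n g i acc).Nodup := by
  induction n with
  | zero => intro i acc _ _ hacc _; exact hacc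
  | succ n ih =>
    intro i acc hg hi hacc hinv
    by_cases h1 : i * i ≤ g
    · have hring : ∀ z : Int, (i + 1) * z = i * z + z := by intro z; ring
      by_cases h2 : PySem.Int.mod g i = 0
      · have hidvd : i ∣ g := (PySem.Int.mod_eq_zero_iff_dvd g i).mp h2
        have hgq : i * PySem.Int.floordiv g i = g := pvQuot_spec g i (by omega) hidvd
        set q := PySem.Int.floordiv g i with hq
        have hq1 : 1 ≤ q := pvPosFactor i q hi (by omega)
        have hiq : i ≤ q := le_of_mul_le_mul_left (by calc i * i ≤ g := h1
                                                        _ = i * q := hgq.symm) (by omega)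
        have hinotin : i ∉ acc := by
          intro hmem
          obtain ⟨_, _, h⟩ := hinv i hmem
          rcases h with h | h
          · omega
          · omega
        have hqnotin : q ∉ acc := by
          intro hmem
          obtain ⟨_, hx1, h⟩ := hinv q hmem
          rcases h with h | h
          · omega
          · omega
        rw [show pvSqrtLoopGo (n + 1) g i acc =
            pvSqrtLoopGo n g (i + 1) (acc ++ [i] ++ (if i ≠ q then [q] else [])) by
          simp only [pvSqrtLoopGo, if_pos h1, if_pos h2, hq]]
        apply ih (i + 1) _ hg (by omega)
        · have hdisj1 : ∀ x ∈ acc, ∀ b ∈ [i], x ≠ b := by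
            intro x hx b hb
            rw [List.mem_singleton] at hb
            subst hb
            intro h
            exact hinotin (h ▸ hx)
          have hacci : (acc ++ [i]).Nodup := by
            rw [List.nodup_append]
            exact ⟨hacc, List.nodup_singleton i, hdisj1⟩
          by_cases hne : i ≠ q
          · simp only [if_pos hne]
            rw [List.nodup_append]
            refine ⟨hacci, List.nodup_singleton q, ?_⟩
            intro t ht b hb
            rw [List.mem_singleton] at hb
            subst hb
            intro htq0
            rcases List.mem_append.mp ht with h | h
            · exact hqnotin (htq0 ▸ h)
            · rw [List.mem_singleton] at h
              exact hne (by rw [← h]; exact htq0)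
          · simp only [if_neg hne, List.append_nil]
            exact hacci
        · intro x hx
          rcases List.mem_append.mp hx with hx' | hxq'
          · rcases List.mem_append.mp hx' with ha' | hi'
            · obtain ⟨d1, d2, d3⟩ := hinv x ha'
              refine ⟨d1, d2, ?_⟩
              rcases d3 with h | h
              · left; omega
              · right; have := hring x; omega
            · rw [List.mem_singleton] at hi'
              subst hi'
              exact ⟨hidvd, by omega, Or.inl (by omega)⟩
          · by_cases hne : i ≠ q
            · simp only [if_pos hne, List.mem_singleton] at hxq'
              subst hxq'
              refine ⟨⟨i, by rw [mul_comm]; omega⟩, hq1, Or.inr ?_⟩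
              have := hring q
              omega
            · simp only [if_neg hne, List.not_mem_nil] at hxq'
      · rw [show pvSqrtLoopGo (n + 1) g i acc = pvSqrtLoopGo n g (i + 1) acc by
          simp only [pvSqrtLoopGo, if_pos h1, if_neg h2]]
        apply ih (i + 1) acc hg (by omega) hacc
        intro x hx
        obtain ⟨d1, d2, d3⟩ := hinv x hx
        refine ⟨d1, d2, ?_⟩
        rcases d3 with h | h
        · left; omega
        · right; have := hring x; omega
    · rw [show pvSqrtLoopGo (n + 1) g i acc = acc by
        simp only [pvSqrtLoopGo, if_neg h1]]
      exact hacc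

-- the two divisor lists agree for positive g
theorem pvDiv_lists_eq (g : Int) (hg : 0 < g) :
    PySem.List.sorted (pvSqrtLoop g 1 []) (fun x => x) false =
      pvDivLoop g 1 [] := by
  have hF : pvDivLoop g 1 [] =
      (PySem.List.pyRange 1 (g + 1) 1).filter (fun x => decide (PySem.Int.mod g x = 0)) := by
    rw [pvDivLoop, pvDivLoopGo_eq _ g 1 [] le_rfl]
    simp
  have hFmem : ∀ x : Int, x ∈ pvDivLoop g 1 [] ↔ (x ∣ g ∧ 1 ≤ x ∧ x ≤ g) := by
    intro x
    rw [hF]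
    simp only [List.mem_filter, PySem.List.mem_pyRange_one, decide_eq_true_eq]
    rw [PySem.Int.mod_eq_zero_iff_dvd]
    constructor
    · rintro ⟨⟨u, v⟩, w⟩; exact ⟨w, u, by omega⟩
    · rintro ⟨u, v, w⟩; exact ⟨⟨v, by omega⟩, u⟩
  have hSmem : ∀ x : Int, x ∈ pvSqrtLoop g 1 [] ↔ (x ∣ g ∧ 1 ≤ x ∧ x ≤ g) := by
    intro x
    rw [pvSqrtLoop, pvSqrtLoopGo_mem g _ 1 [] hg le_rfl le_rfl x]
    simp only [List.not_mem_nil, false_or, one_mul]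
    constructor
    · rintro ⟨h1, h2, h3, _⟩; exact ⟨h1, h2, h3⟩
    · rintro ⟨h1, h2, h3⟩
      refine ⟨h1, h2, h3, ?_⟩
      rcases le_or_gt (x * x) g with hc | hc
      · exact Or.inl ⟨h2, hc⟩
      · exact Or.inr ⟨hc.le, h3⟩
  have hFnodup : (pvDivLoop g 1 []).Nodup := by
    rw [hF]
    exact (PySem.List.nodup_pyRange_one 1 (g + 1)).filter _
  have hSnodup : (pvSqrtLoop g 1 []).Nodup :=
    pvSqrtLoopGo_nodup g _ 1 [] hg le_rfl List.nodup_nil (by simp)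
  have hperm : (pvDivLoop g 1 []).Perm (pvSqrtLoop g 1 []) := by
    rw [List.perm_ext_iff_of_nodup hFnodup hSnodup]
    intro x
    rw [hFmem, hSmem]
  have hpair : (pvDivLoop g 1 []).Pairwise (fun x y : Int => x < y) := by
    rw [hF]
    exact (PySem.List.pairwise_lt_pyRange_one 1 (g + 1)).filter _
  exact PySem.List.sorted_eq_of_perm_of_pairwise_lt _ _ _ hperm hpair

-- positivity of gcd casts
theorem pvGcd_cast_pos (x y : Int) (hx : 0 < x) : (0 : Int) < (Int.gcd x y : Int) := by
  have : Int.gcd x y ≠ 0 := by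
    intro h
    have := Int.gcd_eq_zero_iff.mp h
    omega
  omega

-- the degenerate branch: a = b = c ≤ 0 gives [] on both sides
theorem pvDegenerate (a : Int) (ha : a ≤ 0) :
    totidiv a a a = [] ∧ totidiv_alt a a a = [] := by
  have hsub : pvSubGcd a a = a := by
    rw [pvSubGcd]
    simp [pvSubGcdGo]
  have heuc : pvEuclid a a = a := by
    by_cases h0 : a = 0
    · subst h0; rfl
    · have hmod : PySem.Int.mod a a = 0 := (PySem.Int.mod_eq_zero_iff_dvd a a).mpr dvd_rfl
      obtain ⟨m, hm⟩ : ∃ m, a.natAbs = m + 1 := ⟨a.natAbs - 1, by omega⟩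
      rw [pvEuclid, hm]
      rw [show pvEuclidGo (m + 1 + 1) a a = pvEuclidGo (m + 1) a (PySem.Int.mod a a) by
        simp only [pvEuclidGo, if_neg h0]]
      rw [hmod]
      simp [pvEuclidGo]
  constructor
  · show pvDivLoop (pvSubGcd (pvSubGcd a a) a) 1 [] = []
    rw [hsub, hsub, pvDivLoop, show ((a : Int) + 1 - 1).toNat = a.toNat by omega]
    have : a.toNat = 0 := by omega
    rw [this]
    rfl
  · show PySem.List.sorted (pvSqrtLoop (pvEuclid (pvEuclid a a) a) 1 []) (fun x => x) false = []
    rw [heuc, heuc, pvSqrtLoop, show ((a : Int) + 1 - 1).toNat = a.toNat by omega,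
        show a.toNat = 0 by omega]
    rfl

-- ===== VERDICT (by name: the statement is the Claim_ definition above) =====
theorem totidiv_spec : Claim_equal_totidiv := by
  intro a b c _ hpre
  unfold Spec_totidiv
  rcases hpre with ⟨ha, hb, hc⟩ | ⟨hab, hbc, hneg⟩
  · have h1 : pvSubGcd a b = (Int.gcd a b : Int) := pvSubGcd_eq_gcd a b ha hb
    have h1' : pvEuclid a b = (Int.gcd a b : Int) := pvEuclid_eq_gcd a b ha hb.le
    have hgpos : (0 : Int) < (Int.gcd a b : Int) := pvGcd_cast_pos a b ha
    have h2 : pvSubGcd ((Int.gcd a b : Int)) c = (Int.gcd ((Int.gcd a b : Int)) c : Int) :=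
      pvSubGcd_eq_gcd _ c hgpos hc
    have h2' : pvEuclid ((Int.gcd a b : Int)) c = (Int.gcd ((Int.gcd a b : Int)) c : Int) :=
      pvEuclid_eq_gcd _ c hgpos hc.le
    have hg2pos : (0 : Int) < (Int.gcd ((Int.gcd a b : Int)) c : Int) :=
      pvGcd_cast_pos _ c hgpos
    show pvDivLoop (pvSubGcd (pvSubGcd a b) c) 1 [] =
      PySem.List.sorted (pvSqrtLoop (pvEuclid (pvEuclid a b) c) 1 []) (fun x => x) false
    rw [h1, h2, h1', h2']
    exact (pvDiv_lists_eq _ hg2pos).symm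
  · subst hab; subst hbc
    have h := pvDegenerate a hneg
    show totidiv a a a = totidiv_alt a a a
    rw [h.1, h.2]
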